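-- pv_equiv track=rewrite | github.com/samar-12-23/DSA_Regain | Max_XOR_Subarray_sum.py | maxSubarrayXOR
-- ===== SOURCE A (Python) =====
-- def maxSubarrayXOR(arr, k):
--     # code here
--     n = len(arr)
--     prefix = [0] * (n + 1)
--
--     # Build prefix XOR
--     for i in range(n):
--         prefix[i + 1] = prefix[i] ^ arr[i]
--
--     max_xor = 0
--
--     # XOR of subarray [i, i+k-1] = prefix[i+k] ^ prefix[i]
--     for i in range(n - k + 1):
--         curr_xor = prefix[i + k] ^ prefix[i]
--         max_xor = max(max_xor, curr_xor)
--
--     return max_xor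
-- ===== SOURCE B (Python) =====
-- def maxSubarrayXOR(arr, k):
--     n = len(arr)
--     if k <= 0 or k > n:
--         return 0
--     window = 0
--     for x in arr[:k]:
--         window ^= x
--     best = max(0, window)
--     for i in range(1, n - k + 1):
--         window ^= arr[i - 1] ^ arr[i + k - 1]
--         best = max(best, window)
--     return best
-- ===== Notes on version B (the rewrite author's own statement) =====
-- stated objective: alternative
-- what changed: Replaces the precomputed prefix-XOR table plus scan with a single sliding window that maintains one rolling XOR value, updated by XOR-ing out the departing element and XOR-ing in the arriving one.
import Mathlib
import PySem

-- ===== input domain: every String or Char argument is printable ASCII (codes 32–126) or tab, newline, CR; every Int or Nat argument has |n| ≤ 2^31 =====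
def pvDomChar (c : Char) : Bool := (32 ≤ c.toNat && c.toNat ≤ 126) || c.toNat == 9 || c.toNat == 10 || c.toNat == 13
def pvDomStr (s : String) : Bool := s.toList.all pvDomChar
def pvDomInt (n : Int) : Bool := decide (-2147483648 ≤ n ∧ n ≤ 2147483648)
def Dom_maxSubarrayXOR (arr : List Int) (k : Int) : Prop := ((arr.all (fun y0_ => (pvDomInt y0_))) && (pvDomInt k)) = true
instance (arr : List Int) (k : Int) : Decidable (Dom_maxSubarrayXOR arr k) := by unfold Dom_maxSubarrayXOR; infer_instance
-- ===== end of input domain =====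

-- B replaces A's prefix-XOR table + scan with a single rolling-XOR sliding window (alternative decomposition, O(1) extra space).

-- ===== PORT A =====
-- prefix[i+1] = prefix[i] ^ arr[i], built left to right carrying the last entry
def pvBuildPrefix (acc : Int) : List Int → List Int
  | [] => []
  | a :: rest => (PySem.Int.bxor acc a) :: pvBuildPrefix (PySem.Int.bxor acc a) rest

def maxSubarrayXOR (arr : List Int) (k : Int) : Int :=
  let n : Int := PySem.List.len arr
  let pref : List Int := 0 :: pvBuildPrefix 0 arr
  (PySem.List.pyRange 0 (n - k + 1) 1).foldl
    (fun maxXor i =>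
      max maxXor (PySem.Int.bxor (PySem.List.pyGetD pref (i + k) 0) (PySem.List.pyGetD pref i 0)))
    0

-- ===== PORT B =====
def maxSubarrayXOR_alt (arr : List Int) (k : Int) : Int :=
  let n : Int := PySem.List.len arr
  if k ≤ 0 ∨ n < k then 0
  else
    let window0 : Int := (PySem.List.slice arr none (some k)).foldl PySem.Int.bxor 0
    let st := (PySem.List.pyRange 1 (n - k + 1) 1).foldl
      (fun (s : Int × Int) i =>
        let w := PySem.Int.bxor (PySem.Int.bxor s.1 (PySem.List.pyGetD arr (i - 1) 0))
                   (PySem.List.pyGetD arr (i + k - 1) 0)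
        (w, max s.2 w))
      (window0, max 0 window0)
    st.2

-- ===== PRECONDITION & SPEC =====
-- For k < 0 the Python A raises IndexError (the scan loop indexes prefix past its end); Pre_ excludes exactly those inputs.
def Pre_maxSubarrayXOR (_arr : List Int) (k : Int) : Prop := 0 ≤ k
instance (arr : List Int) (k : Int) : Decidable (Pre_maxSubarrayXOR arr k) := by unfold Pre_maxSubarrayXOR; infer_instance
def pvWitness_maxSubarrayXOR : List Int × Int := ([1, 2, 3], 2)

def Spec_maxSubarrayXOR (arr : List Int) (k : Int) (out : Int) : Prop := out = maxSubarrayXOR_alt arr k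
instance (arr : List Int) (k : Int) (out : Int) : Decidable (Spec_maxSubarrayXOR arr k out) := by unfold Spec_maxSubarrayXOR; infer_instance

-- ===== CLAIM (what is proved, stated in full; the proofs are below) =====
def Claim_equal_maxSubarrayXOR : Prop := ∀ (arr : List Int) (k : Int), Dom_maxSubarrayXOR arr k → Pre_maxSubarrayXOR arr k → Spec_maxSubarrayXOR arr k (maxSubarrayXOR arr k)
-- ===== LEMMAS AND PROOFS =====

-- XOR algebra for PySem.Int.bxor (two's-complement exact); helpers for the sign cases
theorem pv_bxor_pn (m n : Nat) : PySem.Int.bxor (m : Int) (-((n : Int) + 1)) = -(((m ^^^ n : Nat) : Int) + 1) := by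
  unfold PySem.Int.bxor
  rw [if_pos (by omega), if_neg (by omega)]
  have h : (-(-((n : Int) + 1)) - 1) = (n : Int) := by ring
  rw [h]; simp; omega

theorem pv_bxor_np (m n : Nat) : PySem.Int.bxor (-((m : Int) + 1)) (n : Int) = -(((m ^^^ n : Nat) : Int) + 1) := by
  unfold PySem.Int.bxor
  rw [if_neg (by omega), if_pos (by omega)]
  have h : (-(-((m : Int) + 1)) - 1) = (m : Int) := by ring
  rw [h]; simp; omega

theorem pv_bxor_nn (m n : Nat) : PySem.Int.bxor (-((m : Int) + 1)) (-((n : Int) + 1)) = ((m ^^^ n : Nat) : Int) := by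
  unfold PySem.Int.bxor
  rw [if_neg (by omega), if_neg (by omega)]
  have h1 : (-(-((m : Int) + 1)) - 1) = (m : Int) := by ring
  have h2 : (-(-((n : Int) + 1)) - 1) = (n : Int) := by ring
  rw [h1, h2]; simp

theorem pv_bxor_pn' (m n : Nat) : PySem.Int.bxor (m : Int) (-1 + -(n : Int)) = -1 + -((m ^^^ n : Nat) : Int) := by
  have h : (-1 + -(n : Int)) = -((n : Int) + 1) := by ring
  rw [h, pv_bxor_pn]; ring

theorem pv_bxor_np' (m n : Nat) : PySem.Int.bxor (-1 + -(m : Int)) (n : Int) = -1 + -((m ^^^ n : Nat) : Int) := by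
  have h : (-1 + -(m : Int)) = -((m : Int) + 1) := by ring
  rw [h, pv_bxor_np]; ring

theorem pv_bxor_nn' (m n : Nat) : PySem.Int.bxor (-1 + -(m : Int)) (-1 + -(n : Int)) = ((m ^^^ n : Nat) : Int) := by
  have h : ∀ j : Nat, (-1 + -(j : Int)) = -((j : Int) + 1) := by intro j; ring
  rw [h, h, pv_bxor_nn]

theorem pv_bxor_assoc (a b c : Int) :
    PySem.Int.bxor (PySem.Int.bxor a b) c = PySem.Int.bxor a (PySem.Int.bxor b c) := by
  rcases a with m | m <;> rcases b with n | n <;> rcases c with p | p <;>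
    simp [Int.negSucc_eq, pv_bxor_pn', pv_bxor_np', pv_bxor_nn', Nat.xor_assoc]

-- (p ^ q ^ x) ^ y = (p ^ y) ^ (q ^ x): the sliding-window update law
theorem pv_xor_shuffle (p q x y : Int) :
    PySem.Int.bxor (PySem.Int.bxor (PySem.Int.bxor p q) x) y
      = PySem.Int.bxor (PySem.Int.bxor p y) (PySem.Int.bxor q x) := by
  rw [pv_bxor_assoc, pv_bxor_assoc, pv_bxor_assoc]
  congr 1
  rw [← pv_bxor_assoc, PySem.Int.bxor_comm (PySem.Int.bxor q x) y]

-- prefix XOR of the first i elements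
def pvP (arr : List Int) (i : Nat) : Int := (arr.take i).foldl PySem.Int.bxor 0

theorem pvBuildPrefix_getD (arr : List Int) (acc : Int) (i : Nat) (h : i < arr.length) :
    (pvBuildPrefix acc arr).getD i 0 = (arr.take (i + 1)).foldl PySem.Int.bxor acc := by
  induction arr generalizing acc i with
  | nil => simp at h
  | cons a rest ih =>
    cases i with
    | zero => simp [pvBuildPrefix]
    | succ j =>
      simp only [pvBuildPrefix, List.getD_cons_succ, List.take_succ_cons, List.foldl_cons]
      exact ih (PySem.Int.bxor acc a) j (by simpa using h)

theorem pv_pref_getD (arr : List Int) (i : Nat) (h : i ≤ arr.length) :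
    (0 :: pvBuildPrefix 0 arr).getD i 0 = pvP arr i := by
  cases i with
  | zero => simp [pvP]
  | succ j => simpa [pvP] using pvBuildPrefix_getD arr 0 j (by omega)

theorem pvP_succ (arr : List Int) (t : Nat) (h : t < arr.length) :
    pvP arr (t + 1) = PySem.Int.bxor (pvP arr t) arr[t] := by
  unfold pvP
  rw [List.take_add_one, List.getElem?_eq_getElem h, Option.toList_some, List.foldl_append,
      List.foldl_cons, List.foldl_nil]

-- pyGetD on the prefix list, Int index
theorem pv_prefD (arr : List Int) (i : Int) (h0 : 0 ≤ i) (h1 : i ≤ arr.length) :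
    PySem.List.pyGetD (0 :: pvBuildPrefix 0 arr) i 0 = pvP arr i.toNat := by
  have hi : i = (i.toNat : Int) := by omega
  rw [hi, PySem.List.pyGetD_natCast]
  exact pv_pref_getD arr i.toNat (by omega)

-- XOR of the window starting at index i (Int), length k
def pvG (arr : List Int) (k i : Int) : Int :=
  PySem.Int.bxor (pvP arr (i + k).toNat) (pvP arr i.toNat)

-- the sliding-window update step hits pvG
theorem pv_step (arr : List Int) (k a : Int) (hk : 0 < k) (ha : 1 ≤ a)
    (hb : a + k ≤ arr.length) :
    PySem.Int.bxor (PySem.Int.bxor (pvG arr k (a - 1)) (PySem.List.pyGetD arr (a - 1) 0))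
        (PySem.List.pyGetD arr (a + k - 1) 0) = pvG arr k a := by
  have hlen : (1:Int) ≤ arr.length := by omega
  rw [PySem.List.pyGetD_eq_getElem arr 0 (show (0:Int) ≤ a - 1 by omega) (show a - 1 < (arr.length : Int) by omega), PySem.List.pyGetD_eq_getElem arr 0 (show (0:Int) ≤ a + k - 1 by omega) (show a + k - 1 < (arr.length : Int) by omega)]
  unfold pvG
  have e1 : (a - 1 + k).toNat + 1 = (a + k).toNat := by omega
  have e2 : (a - 1).toNat + 1 = a.toNat := by omega
  have h1 : pvP arr (a + k).toNat
      = PySem.Int.bxor (pvP arr (a - 1 + k).toNat) (arr[(a + k - 1).toNat]'(by omega)) := by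
    rw [← e1, pvP_succ arr _ (by omega)]
    congr 2
    omega
  have h2 : pvP arr a.toNat
      = PySem.Int.bxor (pvP arr (a - 1).toNat) (arr[(a - 1).toNat]'(by omega)) := by
    rw [← e2, pvP_succ arr _ (by omega)]
  rw [h1, h2]
  exact pv_xor_shuffle _ _ _ _

-- running the B loop from a with window = pvG (a-1) computes the running max over pvG
theorem pv_loop (arr : List Int) (k : Int) (hk : 0 < k) :
    ∀ (m : Nat) (a w b : Int), 1 ≤ a → ((arr.length : Int) - k + 1 - a).toNat = m →
      w = pvG arr k (a - 1) →
      ((PySem.List.pyRange a ((arr.length : Int) - k + 1) 1).foldl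
        (fun (s : Int × Int) i =>
          let w' := PySem.Int.bxor (PySem.Int.bxor s.1 (PySem.List.pyGetD arr (i - 1) 0))
                     (PySem.List.pyGetD arr (i + k - 1) 0)
          (w', max s.2 w')) (w, b)).2
      = (PySem.List.pyRange a ((arr.length : Int) - k + 1) 1).foldl
          (fun mx i => max mx (pvG arr k i)) b := by
  intro m
  induction m with
  | zero =>
    intro a w b _ hm _
    rw [PySem.List.pyRange_one_eq_nil (by omega)]
    rfl
  | succ m ih =>
    intro a w b ha hm hw
    have hlt : a < (arr.length : Int) - k + 1 := by omega
    rw [PySem.List.pyRange_one_cons hlt]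
    simp only [List.foldl_cons]
    have hstep : PySem.Int.bxor (PySem.Int.bxor w (PySem.List.pyGetD arr (a - 1) 0))
        (PySem.List.pyGetD arr (a + k - 1) 0) = pvG arr k a := by
      rw [hw]; exact pv_step arr k a hk ha (by omega)
    simp only [hstep]
    exact ih (a + 1) (pvG arr k a) (max b (pvG arr k a)) (by omega) (by omega) (by ring_nf)

-- the A-side loop body equals max with pvG on in-range indices
theorem pv_a_fold (arr : List Int) (k : Int) (hk : 0 ≤ k) (_hkn : k ≤ (arr.length : Int)) :
    ∀ (a b : Int), 0 ≤ a →
    (PySem.List.pyRange a ((arr.length : Int) - k + 1) 1).foldl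
      (fun mx i => max mx (PySem.Int.bxor
        (PySem.List.pyGetD (0 :: pvBuildPrefix 0 arr) (i + k) 0)
        (PySem.List.pyGetD (0 :: pvBuildPrefix 0 arr) i 0))) b
    = (PySem.List.pyRange a ((arr.length : Int) - k + 1) 1).foldl
        (fun mx i => max mx (pvG arr k i)) b := by
  intro a b ha
  apply PySem.List.foldl_congr_mem
  intro acc x hx
  rw [PySem.List.mem_pyRange_one] at hx
  rw [pv_prefD arr (x + k) (by omega) (by omega), pv_prefD arr x (by omega) (by omega)]
  rfl

theorem pv_fold_max_zero (l : List Int) (g : Int → Int) (hg : ∀ i ∈ l, g i = 0) :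
    l.foldl (fun mx i => max mx (g i)) 0 = 0 := by
  induction l with
  | nil => rfl
  | cons x rest ih =>
    simp only [List.foldl_cons, hg x (by simp)]
    exact ih (fun i hi => hg i (by simp [hi]))

-- ===== VERDICT (by name: the statement is the Claim_ definition above) =====
theorem maxSubarrayXOR_spec : Claim_equal_maxSubarrayXOR := by
  intro arr k _ hk
  unfold Pre_maxSubarrayXOR at hk
  unfold Spec_maxSubarrayXOR maxSubarrayXOR maxSubarrayXOR_alt
  simp only [PySem.List.len_eq]
  by_cases hk0 : k = 0
  · -- every window XOR is prefix[i] ^ prefix[i] = 0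
    subst hk0
    rw [if_pos (by left; omega)]
    apply pv_fold_max_zero
    intro i _
    simp [PySem.Int.bxor_self]
  · by_cases hkn : (arr.length : Int) < k
    · -- no window of length k exists: A's loop range is empty
      rw [if_pos (by right; exact hkn), PySem.List.pyRange_one_eq_nil (by omega)]
      rfl
    · have hk1 : 0 < k := by omega
      have hkn' : k ≤ (arr.length : Int) := by omega
      rw [if_neg (by omega)]
      rw [pv_a_fold arr k (by omega) hkn' 0 0 le_rfl,
          PySem.List.pyRange_one_cons (by omega)]
      simp only [List.foldl_cons]
      have hw0 : (PySem.List.slice arr none (some k)).foldl PySem.Int.bxor 0 = pvG arr k 0 := by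
        rw [PySem.List.slice_to arr (by omega)]
        unfold pvG pvP
        simp
      have h01 : (0:Int) + 1 = 1 := by norm_num
      rw [h01, hw0]
      exact (pv_loop arr k hk1 ((arr.length : Int) - k + 1 - 1).toNat 1 (pvG arr k 0)
        (max 0 (pvG arr k 0)) le_rfl rfl (by norm_num)).symm
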